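-- pv_equiv track=rewrite | github.com/Happzy-WHU/RoleGLM | make_profile/format_role_to_last.py | remove_until_by_name
-- ===== SOURCE A (Python) =====
-- def remove_until_by_name(lst, name):
--     for sublist in lst:
--         for i in reversed(range(len(sublist))):
--             if 'role' in sublist[i] and sublist[i]['role'] == name:
--                 break
--             else:
--                 del sublist[i]
--     return lst
-- ===== SOURCE B (Python) =====
-- def remove_until_by_name(lst, name):
--     for sublist in lst:
--         cut = 0
--         for i, el in enumerate(sublist):
--             if 'role' in el and el['role'] == name:
--                 cut = i + 1
--         del sublist[cut:]
--     return lst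
-- ===== Notes on version B (the rewrite author's own statement) =====
-- stated objective: simpler
-- what changed: A scans each sublist backwards deleting items one by one until a role==name element; B does one forward enumerate pass computing the last matching position (cut) and truncates the sublist once with del sublist[cut:].
import Mathlib
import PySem

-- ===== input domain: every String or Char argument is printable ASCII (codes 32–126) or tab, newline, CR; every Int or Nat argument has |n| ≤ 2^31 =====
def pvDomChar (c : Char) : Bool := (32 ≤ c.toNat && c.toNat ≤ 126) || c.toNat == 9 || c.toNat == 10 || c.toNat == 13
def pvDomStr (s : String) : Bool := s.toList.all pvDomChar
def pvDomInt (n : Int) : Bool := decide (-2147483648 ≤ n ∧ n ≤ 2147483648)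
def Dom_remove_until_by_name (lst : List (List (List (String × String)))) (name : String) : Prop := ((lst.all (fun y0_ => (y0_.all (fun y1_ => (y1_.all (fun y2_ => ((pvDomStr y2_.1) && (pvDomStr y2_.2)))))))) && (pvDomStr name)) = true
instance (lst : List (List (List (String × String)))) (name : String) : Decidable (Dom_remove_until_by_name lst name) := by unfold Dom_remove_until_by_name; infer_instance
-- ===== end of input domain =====

-- B replaces A's backward delete-one-by-one scan by one forward pass computing the
-- last matching position and a single truncation; return values proved equal (both
-- Pythons mutate the sublists in place to the same final contents).

-- ===== PORT A =====
-- `'role' in d and d['role'] == name` (first-match dict lookup)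
def pvRoleMatches (d : List (String × String)) (name : String) : Bool :=
  d.lookup "role" == some name

-- A's inner loop: `for i in reversed(range(len(sublist))): if match: break else: del sublist[i]`
-- processed on the reversed sublist (deleting from index i downward = dropping the
-- reversed prefix until a match), then reversed back.
def pvALoop (name : String) : List (List (String × String)) → List (List (String × String))
  | [] => []
  | x :: xs => if pvRoleMatches x name then x :: xs else pvALoop name xs

def remove_until_by_name (lst : List (List (List (String × String)))) (name : String) : List (List (List (String × String))) :=
  lst.map (fun sublist => (pvALoop name sublist.reverse).reverse)

-- ===== PORT B =====
-- B's inner pass: `cut = 0; for i, el in enumerate(sublist): if match: cut = i+1`, then `del sublist[cut:]`.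
def pvBCut (name : String) (sublist : List (List (String × String))) : Int :=
  (PySem.List.enumerate sublist).foldl
    (fun c p => if pvRoleMatches p.2 name then p.1 + 1 else c) 0

def remove_until_by_name_alt (lst : List (List (List (String × String)))) (name : String) : List (List (List (String × String))) :=
  lst.map (fun sublist => PySem.List.slice sublist none (some (pvBCut name sublist)))

-- ===== PRECONDITION & SPEC =====
def Spec_remove_until_by_name (lst : List (List (List (String × String)))) (name : String) (out : List (List (List (String × String)))) : Prop := out = remove_until_by_name_alt lst name
instance (lst : List (List (List (String × String)))) (name : String) (out : List (List (List (String × String)))) : Decidable (Spec_remove_until_by_name lst name out) := by unfold Spec_remove_until_by_name; infer_instance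

-- ===== CLAIM (what is proved, stated in full; the proofs are below) =====
def Claim_equal_remove_until_by_name : Prop := ∀ (lst : List (List (List (String × String)))) (name : String), Dom_remove_until_by_name lst name → Spec_remove_until_by_name lst name (remove_until_by_name lst name)

-- ===== LEMMAS AND PROOFS =====

theorem pvBCut_nonneg (name : String) (s : List (List (String × String))) :
    0 ≤ pvBCut name s := by
  induction s using List.reverseRecOn with
  | nil => simp [pvBCut]
  | append_singleton s y ih =>
    unfold pvBCut
    rw [PySem.List.enumerate_append, List.foldl_append]
    simp only [PySem.List.enumerate_cons, PySem.List.enumerate_nil, List.foldl_cons, List.foldl_nil]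
    split
    · omega
    · exact ih

theorem pvBCut_le (name : String) (s : List (List (String × String))) :
    (pvBCut name s).toNat ≤ s.length := by
  induction s using List.reverseRecOn with
  | nil => simp [pvBCut]
  | append_singleton s y ih =>
    unfold pvBCut
    rw [PySem.List.enumerate_append, List.foldl_append]
    simp only [PySem.List.enumerate_cons, PySem.List.enumerate_nil, List.foldl_cons, List.foldl_nil,
      List.length_append, List.length_singleton]
    split
    · omega
    · exact Nat.le_trans ih (by omega)

theorem pvBCut_concat (name : String) (s : List (List (String × String))) (y : List (String × String)) :
    pvBCut name (s ++ [y]) = if pvRoleMatches y name then (s.length : Int) + 1 else pvBCut name s := by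
  unfold pvBCut
  rw [PySem.List.enumerate_append, List.foldl_append]
  simp [PySem.List.enumerate_cons]

theorem pv_sub_eq (name : String) (s : List (List (String × String))) :
    (pvALoop name s.reverse).reverse = PySem.List.slice s none (some (pvBCut name s)) := by
  induction s using List.reverseRecOn with
  | nil => simp [pvALoop, pvBCut, PySem.List.slice]
  | append_singleton s y ih =>
    rw [pvBCut_concat, List.reverse_append]
    simp only [List.reverse_singleton, List.singleton_append, pvALoop]
    by_cases h : pvRoleMatches y name
    · rw [if_pos h, if_pos h, List.reverse_cons, List.reverse_reverse,
        PySem.List.slice_to _ (by omega)]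
      have : ((s.length : Int) + 1).toNat = s.length + 1 := by omega
      rw [this]
      exact (List.take_of_length_le (by simp)).symm
    · rw [if_neg h, if_neg h, ih,
        PySem.List.slice_to _ (pvBCut_nonneg name s),
        PySem.List.slice_to _ (pvBCut_nonneg name s)]
      exact (List.take_append_of_le_length (pvBCut_le name s)).symm

-- ===== VERDICT (by name: the statement is the Claim_ definition above) =====
theorem remove_until_by_name_spec : Claim_equal_remove_until_by_name := by
  intro lst name _
  unfold Spec_remove_until_by_name remove_until_by_name remove_until_by_name_alt
  exact List.map_congr_left (fun s _ => pv_sub_eq name s)
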